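-- pv_equiv track=rewrite | github.com/adrianoporzia/Universita | secondo_anno/Algoritmi/Modulo_uno/speciale.py | speciale
-- ===== SOURCE A (Python) =====
-- def speciale(A):
--     SP, SF = 0, 0
--     for i in range(len(A) - 1):
--         SP += A[i]
--     for i in range(len(A) - 1):
--         SF += A[i]
--         SP -= A[i]
--         if SF > SP:
--             return i
-- ===== SOURCE B (Python) =====
-- def speciale(A):
--     n = len(A) - 1
--     return next((i for i in range(n) if sum(A[:i + 1]) > sum(A[i + 1:n])), None)
-- ===== Notes on version B (the rewrite author's own statement) =====
-- stated objective: simpler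
-- what changed: B drops A's streamed accumulators entirely: for each index it compares the closed-form slice sums sum(A[:i+1]) > sum(A[i+1:n]) and returns the first matching index via next(..., None), trading A's O(n) two-accumulator scan for a declarative O(n^2) per-index test.
import Mathlib
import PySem

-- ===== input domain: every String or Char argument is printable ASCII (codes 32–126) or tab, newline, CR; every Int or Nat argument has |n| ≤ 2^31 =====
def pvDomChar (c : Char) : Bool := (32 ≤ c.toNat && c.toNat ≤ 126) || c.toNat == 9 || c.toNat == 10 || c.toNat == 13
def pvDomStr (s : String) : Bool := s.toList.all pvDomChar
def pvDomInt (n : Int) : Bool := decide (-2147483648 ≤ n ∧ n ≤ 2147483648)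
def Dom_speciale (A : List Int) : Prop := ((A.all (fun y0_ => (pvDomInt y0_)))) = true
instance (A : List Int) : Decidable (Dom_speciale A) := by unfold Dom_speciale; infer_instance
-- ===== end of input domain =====

-- B replaces A's two streamed accumulators (growing prefix SF, shrinking remainder SP) by a
-- declarative per-index test: the first i with sum(A[:i+1]) > sum(A[i+1:n]); objective: simpler.

-- ===== PORT A =====
-- A's loops run i over range(len(A)-1) reading A[i]; those elements are exactly A.dropLast
-- (range(-1) is empty, matching dropLast [] = []), so each loop is the obvious structural
-- recursion / fold over A.dropLast.
def specialeLoopA : List Int → Int → Int → Int → Option Int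
  | [], _, _, _ => none
  | x :: xs, i, SF, SP =>
      let SF' := SF + x
      let SP' := SP - x
      if SF' > SP' then some i else specialeLoopA xs (i + 1) SF' SP'

def speciale (A : List Int) : Option Int :=
  let SP := A.dropLast.foldl (· + ·) 0      -- first loop: SP += A[i]
  specialeLoopA A.dropLast 0 0 SP           -- second loop

-- ===== PORT B =====
-- Source B: n = len(A) - 1; next((i for i in range(n) if sum(A[:i+1]) > sum(A[i+1:n])), None).
-- next over a filtered range is List.find? over pyRange; the slice sums are sums of PySem slices.
def speciale_alt (A : List Int) : Option Int :=
  let n : Int := (A.length : Int) - 1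
  (PySem.List.pyRange 0 n 1).find? (fun i =>
    decide ((PySem.List.slice A none (some (i + 1))).sum
            > (PySem.List.slice A (some (i + 1)) (some n)).sum))

-- ===== PRECONDITION & SPEC =====
def Spec_speciale (A : List Int) (out : Option Int) : Prop := out = speciale_alt A
instance (A : List Int) (out : Option Int) : Decidable (Spec_speciale A out) := by unfold Spec_speciale; infer_instance

-- ===== CLAIM =====
def Claim_equal_speciale : Prop := ∀ (A : List Int), Dom_speciale A → Spec_speciale A (speciale A)

-- ===== LEMMAS AND PROOFS =====
-- find? congruence on members (not in Mathlib under this name).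
theorem pvFind?_congr {α : Type} (l : List α) (p q : α → Bool)
    (h : ∀ a ∈ l, p a = q a) : l.find? p = l.find? q := by
  induction l with
  | nil => rfl
  | cons x xs ih =>
      simp only [List.find?]
      rw [h x (List.mem_cons_self)]
      cases q x
      · exact ih (fun a ha => h a (List.mem_cons_of_mem _ ha))
      · rfl

-- Core invariant: at loop state (index k, SF = sum of the first k elements of xs,
-- SP = sum of the rest), A's loop over the remaining suffix returns the first index
-- i ≥ k with (xs.take (i+1)).sum > (xs.drop (i+1)).sum.
theorem specialeLoopA_eq_find (ys : List Int) : ∀ (k : Nat) (xs : List Int),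
    ys = xs.drop k →
    specialeLoopA ys (k : Int) ((xs.take k).sum) ((xs.drop k).sum) =
      (PySem.List.pyRange (k : Int) (xs.length : Int) 1).find? (fun i =>
        decide ((xs.take (i + 1).toNat).sum > (xs.drop (i + 1).toNat).sum)) := by
  induction ys with
  | nil =>
      intro k xs h
      have hk : xs.length ≤ k := by
        have := congrArg List.length h
        simp [List.length_drop] at this
        omega
      rw [PySem.List.pyRange_one_eq_nil (by exact_mod_cast hk)]
      rfl
  | cons y ys ih =>
      intro k xs h
      have hk : k < xs.length := by
        have := congrArg List.length h
        simp [List.length_drop] at this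
        omega
      have hy : xs.drop k = y :: ys := h.symm
      have hdrop1 : xs.drop (k + 1) = ys := by
        rw [← List.tail_drop, hy]; rfl
      have hget : xs[k]'hk = y := by
        have h0 : (xs.drop k)[0]'(by simp [hy]) = y := by simp [hy]
        rw [List.getElem_drop] at h0
        simpa using h0
      have htake1 : xs.take (k + 1) = xs.take k ++ [y] := by
        rw [List.take_add_one]
        simp [List.getElem?_eq_getElem hk, hget]
      rw [PySem.List.pyRange_one_cons (by exact_mod_cast hk)]
      simp only [specialeLoopA, List.find?]
      have hcast : ((k : Int) + 1).toNat = k + 1 := by omega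
      have hcond : ((xs.take k).sum + y > (xs.drop k).sum - y)
          ↔ ((xs.take (((k : Int) + 1).toNat)).sum > (xs.drop (((k : Int) + 1).toNat)).sum) := by
        rw [hcast, htake1, hdrop1]
        have hsum : (xs.drop k).sum = y + ys.sum := by rw [hy]; simp
        simp [hsum]
        try omega
      have hcond' : ((xs.take k).sum + y > (xs.drop k).sum - y)
          ↔ ((xs.take (k + 1)).sum > (xs.drop (k + 1)).sum) := by
        rw [← hcast]; exact hcond
      by_cases hc : (xs.take k).sum + y > (xs.drop k).sum - y
      · rw [if_pos hc]
        simp [hcond'.mp hc]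
      · rw [if_neg hc]
        have hfalse : ¬ ((xs.take (k + 1)).sum > (xs.drop (k + 1)).sum) :=
          fun hx => hc (hcond'.mpr hx)
        simp only [gt_iff_lt, not_lt] at hfalse
        rw [hcast]
        rw [decide_eq_false (by simp only [gt_iff_lt, not_lt]; omega :
          ¬ (xs.take (k+1)).sum > (xs.drop (k+1)).sum)]
        have hsf : (xs.take k).sum + y = (xs.take (k + 1)).sum := by rw [htake1]; simp
        have hsp : (xs.drop k).sum - y = (xs.drop (k + 1)).sum := by
          have : (xs.drop k).sum = y + (xs.drop (k + 1)).sum := by rw [hy, hdrop1]; simp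
          omega
        have hrec := ih (k + 1) xs (by rw [hdrop1])
        rw [hsf, hsp]
        push_cast at hrec ⊢
        exact hrec

-- B's slice-sum predicate agrees with the take/drop predicate on xs = A.dropLast,
-- for every i in range(0, len(A)-1).
theorem pred_eq (A : List Int) (i : Int) (h0 : 0 ≤ i) (h1 : i < (A.length : Int) - 1) :
    (decide ((PySem.List.slice A none (some (i + 1))).sum
             > (PySem.List.slice A (some (i + 1)) (some ((A.length : Int) - 1))).sum))
    = (decide ((A.dropLast.take (i + 1).toNat).sum > (A.dropLast.drop (i + 1).toNat).sum)) := by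
  have hm : (i + 1).toNat ≤ A.length - 1 := by omega
  have h1' : PySem.List.slice A none (some (i + 1)) = A.take (i + 1).toNat :=
    PySem.List.slice_to A (by omega)
  have h2' : PySem.List.slice A (some (i + 1)) (some ((A.length : Int) - 1))
      = (A.drop (i + 1).toNat).take (((A.length : Int) - 1).toNat - (i + 1).toNat) :=
    PySem.List.slice_toNat A (by omega) (by omega)
  have hlen : ((A.length : Int) - 1).toNat = A.length - 1 := by omega
  rw [h1', h2', hlen]
  have htake : A.dropLast.take (i + 1).toNat = A.take (i + 1).toNat := by
    rw [List.dropLast_eq_take, List.take_take, Nat.min_eq_left hm]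
  have hdrop : A.dropLast.drop (i + 1).toNat = (A.drop (i + 1).toNat).take (A.length - 1 - (i + 1).toNat) := by
    rw [List.dropLast_eq_take, List.drop_take]
  rw [htake, hdrop]

-- ===== VERDICT =====
theorem speciale_spec : Claim_equal_speciale := by
  intro A _
  unfold Spec_speciale speciale speciale_alt
  rcases eq_or_ne A [] with hA | hA
  · subst hA; rfl
  · have hlen : A.dropLast.length = A.length - 1 := List.length_dropLast
    have hlen' : (A.dropLast.length : Int) = (A.length : Int) - 1 := by
      rw [hlen]
      have : 1 ≤ A.length := List.length_pos_iff.mpr hA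
      omega
    have hmain := specialeLoopA_eq_find A.dropLast 0 A.dropLast rfl
    simp only [List.take_zero, List.sum_nil, List.drop_zero, Nat.cast_zero] at hmain
    rw [← List.sum_eq_foldl, hmain, hlen']
    exact pvFind?_congr _ _ _ (fun i hi => by
      have hmem := (PySem.List.mem_pyRange_one).mp hi
      exact (pred_eq A i hmem.1 hmem.2).symm)
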